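-- pv_equiv track=rewrite | github.com/tsani/coding-cat-public | double_n-th/mutation_3.py | double_n_th
-- ===== SOURCE A (Python) =====
-- def double_n_th(string, n):
--     """
--     Bug: Off-by-one error in the n-th character calculation (uses `i % n` instead of `(i + 1) % n`).
--     """
--     if n <= 0 or not string:
--         return ""
--     if n > len(string):
--         return string
--
--     result = []
--     for i, char in enumerate(string):
--         if i % n == 0:  # Off-by-one error
--             result.append(char * 2)
--         else:
--             result.append(char)
--     return "".join(result)
-- ===== SOURCE B (Python) =====
-- def double_n_th(string, n):
--     if n <= 0 or not string:
--         return ""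
--     if n > len(string):
--         return string
--     return _double_chunks(string, n)
--
--
-- def _double_chunks(s, n):
--     # n >= 1 here; double the first char of each n-sized chunk, recursively.
--     if not s:
--         return ""
--     return s[0] * 2 + s[1:n] + _double_chunks(s[n:], n)
-- ===== Notes on version B (the rewrite author's own statement) =====
-- stated objective: faster
-- what changed: A tests i % n == 0 for every character in one enumerate pass; B recursively processes the string in n-sized chunks, doubling each chunk's first character and keeping its tail via bulk slicing, with no per-character index arithmetic.
import Mathlib
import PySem

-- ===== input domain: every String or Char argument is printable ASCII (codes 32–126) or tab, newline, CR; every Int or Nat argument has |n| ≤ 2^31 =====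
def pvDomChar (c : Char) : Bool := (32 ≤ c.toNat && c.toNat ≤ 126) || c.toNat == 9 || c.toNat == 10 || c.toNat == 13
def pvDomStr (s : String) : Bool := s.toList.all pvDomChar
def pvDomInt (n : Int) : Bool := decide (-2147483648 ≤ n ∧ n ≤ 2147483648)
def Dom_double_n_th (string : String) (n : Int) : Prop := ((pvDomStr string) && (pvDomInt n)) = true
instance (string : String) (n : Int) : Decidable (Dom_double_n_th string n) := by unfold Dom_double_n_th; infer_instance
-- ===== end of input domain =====

-- B replaces A's per-character index-mod test by a recursive pass over n-sized chunks
-- (double the chunk head, keep its tail via bulk slices); a timing run measured B faster.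


-- ===== PORT A =====
-- 'for i, char in enumerate(string): result.append(char*2 if i % n == 0 else char)' then '"".join(result)'
def double_n_th (string : String) (n : Int) : String :=
  if n ≤ 0 ∨ string.toList = [] then ""
  else if (string.toList.length : Int) < n then string
  else
    String.ofList (PySem.Chars.join []
      ((PySem.List.enumerate string.toList 0).foldl
        (fun acc p => acc ++ [if PySem.Int.mod p.1 n = 0 then [p.2, p.2] else [p.2]]) []))

-- ===== PORT B =====
-- _double_chunks(s, n) = s[0]*2 + s[1:n] + _double_chunks(s[n:], n); only called with n ≥ 1,
-- so fuel = s.length makes the recursion total (each step drops ≥ 1 character).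
def dchunks (n : Int) : Nat → List Char → List Char
  | _, [] => []
  | 0, _ => []
  | fuel + 1, c :: rest =>
      [c, c] ++ PySem.List.slice (c :: rest) (some 1) (some n)
        ++ dchunks n fuel (PySem.List.slice (c :: rest) (some n) none)

def double_n_th_alt (string : String) (n : Int) : String :=
  if n ≤ 0 ∨ string.toList = [] then ""
  else if (string.toList.length : Int) < n then string
  else String.ofList (dchunks n string.toList.length string.toList)

-- ===== PRECONDITION & SPEC =====
def Spec_double_n_th (string : String) (n : Int) (out : String) : Prop := out = double_n_th_alt string n
instance (string : String) (n : Int) (out : String) : Decidable (Spec_double_n_th string n out) := by unfold Spec_double_n_th; infer_instance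

-- ===== CLAIM (what is proved, stated in full; the proofs are below) =====
def Claim_equal_double_n_th : Prop := ∀ (string : String) (n : Int), Dom_double_n_th string n → Spec_double_n_th string n (double_n_th string n)

-- ===== LEMMAS AND PROOFS =====

-- the per-character piece A appends at index p.1
def gP (n : Int) (p : Int × Char) : List Char :=
  if PySem.Int.mod p.1 n = 0 then [p.2, p.2] else [p.2]

lemma join_nil_eq_flatten (parts : List (List Char)) :
    PySem.Chars.join [] parts = parts.flatten := by
  simp only [PySem.Chars.join, List.intercalate]
  induction parts with
  | nil => rfl
  | cons a l ih =>
    cases l with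
    | nil => rfl
    | cons b m => simp [List.intersperse] at ih ⊢; simpa using ih

lemma gP_shift {n : Int} (hn : 0 < n) (s : List Char) (k : Int) :
    (PySem.List.enumerate s (k + n)).map (gP n) = (PySem.List.enumerate s k).map (gP n) := by
  induction s generalizing k with
  | nil => rfl
  | cons c cs ih =>
    rw [PySem.List.enumerate_cons, PySem.List.enumerate_cons]
    have h1 : PySem.Int.mod (k + n) n = PySem.Int.mod k n := by
      rw [PySem.Int.mod_eq_emod_of_pos hn, PySem.Int.mod_eq_emod_of_pos hn, Int.add_emod_right]
    have h2 : k + n + 1 = (k + 1) + n := by ring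
    simp only [List.map_cons, gP, h1, h2, ih]

lemma gP_mid {n : Int} (hn : 0 < n) (s : List Char) :
    ∀ k : Int, 1 ≤ k → k ≤ n →
    ((PySem.List.enumerate s k).map (gP n)).flatten
      = s.take (n - k).toNat
        ++ ((PySem.List.enumerate (s.drop (n - k).toNat) 0).map (gP n)).flatten := by
  induction s with
  | nil => intro k _ _; simp
  | cons c cs ih =>
    intro k hk1 hkn
    rcases eq_or_lt_of_le hkn with heq | hlt
    · subst heq
      have h0 : (k - k).toNat = 0 := by omega
      have hsh := gP_shift hn (c :: cs) 0
      rw [zero_add] at hsh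
      simp only [h0, List.take_zero, List.drop_zero, List.nil_append]
      rw [hsh]
    · have hmod : PySem.Int.mod k n = k := by
        rw [PySem.Int.mod_eq_emod_of_pos hn]
        exact Int.emod_eq_of_lt (by omega) hlt
      have hne : PySem.Int.mod k n ≠ 0 := by omega
      have htn : (n - k).toNat = (n - (k + 1)).toNat + 1 := by omega
      rw [PySem.List.enumerate_cons]
      simp only [List.map_cons, List.flatten_cons, gP, if_neg hne, htn,
        List.take_succ_cons, List.drop_succ_cons]
      rw [ih (k + 1) (by omega) (by omega)]
      simp

lemma main_eq {n : Int} (hn : 0 < n) :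
    ∀ (fuel : Nat) (s : List Char), s.length ≤ fuel →
    ((PySem.List.enumerate s 0).map (gP n)).flatten = dchunks n fuel s := by
  intro fuel
  induction fuel with
  | zero =>
    intro s hs
    have : s = [] := by
      cases s with
      | nil => rfl
      | cons a l => simp at hs
    subst this; rfl
  | succ fuel ih =>
    intro s hs
    cases s with
    | nil => rfl
    | cons c rest =>
      have hmod0 : PySem.Int.mod (0 : Int) n = 0 := by
        rw [PySem.Int.mod_eq_emod_of_pos hn]; simp
      rw [PySem.List.enumerate_cons]
      simp only [List.map_cons, List.flatten_cons, gP, if_pos hmod0, zero_add]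
      rw [gP_mid hn rest 1 le_rfl hn]
      -- slices of B unfolded to take/drop
      have hs1 : PySem.List.slice (c :: rest) (some 1) (some n)
          = rest.take (n - 1).toNat := by
        rw [PySem.List.slice_toNat _ (by omega) (by omega)]
        simp
      have hs2 : PySem.List.slice (c :: rest) (some n) none
          = rest.drop (n - 1).toNat := by
        rw [PySem.List.slice_from _ (by omega)]
        have : n.toNat = (n - 1).toNat + 1 := by omega
        rw [this, List.drop_succ_cons]
      have hlen : (rest.drop (n - 1).toNat).length ≤ fuel := by
        simp only [List.length_drop]
        simp at hs; omega
      rw [ih _ hlen]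
      show [c, c] ++ _ = dchunks n (fuel + 1) (c :: rest)
      rw [dchunks, hs1, hs2, List.append_assoc]

-- ===== VERDICT (by name: the statement is the Claim_ definition above) =====
theorem double_n_th_spec : Claim_equal_double_n_th := by
  intro string n _
  unfold Spec_double_n_th double_n_th double_n_th_alt
  split
  · rfl
  · split
    · rfl
    · rename_i h1 _
      have hn : 0 < n := by
        rcases not_or.mp h1 with ⟨h1a, _⟩
        omega
      rw [PySem.List.foldl_append_singleton_eq_map
            (f := fun p : Int × Char => if PySem.Int.mod p.1 n = 0 then [p.2, p.2] else [p.2])]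
      have hg : (fun p : Int × Char => if PySem.Int.mod p.1 n = 0 then [p.2, p.2] else [p.2]) = gP n := rfl
      rw [hg, List.nil_append, join_nil_eq_flatten,
        main_eq hn string.toList.length string.toList le_rfl]
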